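-- pv_equiv track=rewrite | github.com/BadWolf1023/MKW-Table-Bot | TagAI_BadWolf.py | __count_tags
-- ===== SOURCE A (Python) =====
-- from typing import List, Set, Dict, Tuple
--
-- def __count_tags(all_possible:Dict[Tuple[str, str], List[Tuple[str, str]]]) -> Dict[Tuple[str, str], List[Tuple[str, str, int]]]:
--     this_player_tag_scores = {}
--     for fc_player_1, tags_1 in all_possible.items():
--         this_player_tag_scores[fc_player_1] = []
--         for player_1_tag in tags_1:
--             found = 0
--             for fc_player_2, tags_2 in all_possible.items():
--                 if fc_player_1[0] != fc_player_2[0]: #Don't get tags for ourself...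
--                     for player_2_tag in tags_2:
--                         if player_1_tag[0] == player_2_tag[0]: #if they have the same tag VALUE, not actual tag
--                             found += 1
--                             break
--             this_player_tag_scores[fc_player_1].append( (player_1_tag[0], player_1_tag[1], found) )
--     return this_player_tag_scores
-- ===== SOURCE B (Python) =====
-- def __count_tags(all_possible):
--     # One pass builds two counters; each score is then two O(1) lookups.
--     totals = {}  # tag value -> number of dict entries having that value
--     pairs = {}   # (tag value, fc) -> number of entries with that fc having that value
--     for (fc, _name), tags in all_possible.items():
--         for value in dict.fromkeys(tag for tag, _orig in tags):
--             totals[value] = totals.get(value, 0) + 1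
--             pairs[(value, fc)] = pairs.get((value, fc), 0) + 1
--     return {(fc, name): [(value, orig, totals.get(value, 0) - pairs.get((value, fc), 0))
--                          for value, orig in tags]
--             for (fc, name), tags in all_possible.items()}
-- ===== Notes on version B (the rewrite author's own statement) =====
-- stated objective: faster
-- what changed: Replaced the quadratic rescan of all players for every tag by a single pass that builds two counters (tag value -> number of entries having it, and (tag value, fc) -> number of entries with that fc having it); each score is then totals[value] - pairs[(value, fc)] in O(1).
import Mathlib
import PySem

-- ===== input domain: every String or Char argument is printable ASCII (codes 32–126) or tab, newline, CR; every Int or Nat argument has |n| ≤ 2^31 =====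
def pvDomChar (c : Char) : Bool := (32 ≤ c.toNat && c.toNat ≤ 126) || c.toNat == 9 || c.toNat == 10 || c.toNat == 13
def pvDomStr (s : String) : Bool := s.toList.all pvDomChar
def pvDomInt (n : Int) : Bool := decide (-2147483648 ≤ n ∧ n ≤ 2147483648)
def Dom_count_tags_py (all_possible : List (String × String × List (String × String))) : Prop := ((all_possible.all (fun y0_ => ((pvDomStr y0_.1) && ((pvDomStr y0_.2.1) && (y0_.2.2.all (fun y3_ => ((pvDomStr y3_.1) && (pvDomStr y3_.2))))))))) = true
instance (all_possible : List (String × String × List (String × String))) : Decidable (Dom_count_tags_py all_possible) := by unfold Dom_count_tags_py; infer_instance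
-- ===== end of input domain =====

-- B replaces A's per-tag rescan of all players by one pass building two counters, then O(1) lookups.
-- Both ports first decode the assoc-list argument into the items of the Python dict it denotes
-- (duplicate keys collapse exactly as in a Python dict: first position, last value); this is the
-- identity on well-formed dict arguments.
def pvItems (xs : List (String × String × List (String × String))) :
    List (String × String × List (String × String)) :=
  ((PySem.Dict.ofList (xs.map (fun e => ((e.1, e.2.1), e.2.2)))).items).map
    (fun p => (p.1.1, p.1.2, p.2))

-- ===== PORT A =====
def count_tags_py (all_possible : List (String × String × List (String × String))) : List (String × String × List (String × String × Int)) :=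
  let items := pvItems all_possible
  items.foldl (fun acc e1 =>
    acc ++ [(e1.1, e1.2.1,
      e1.2.2.foldl (fun lst t1 =>
        lst ++ [(t1.1, t1.2,
          -- inner loop over tags_2 with 'break' after the first match = List.any
          items.foldl (fun found e2 =>
            if e1.1 != e2.1 then
              if e2.2.2.any (fun t2 => t2.1 == t1.1) then found + 1 else found
            else found) (0 : Int))]) [])]) []

-- ===== PORT B =====
def count_tags_py_alt (all_possible : List (String × String × List (String × String))) : List (String × String × List (String × String × Int)) :=
  let items := pvItems all_possible
  let cnts : PySem.Dict String Int × PySem.Dict (String × String) Int :=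
    items.foldl (fun cnts e =>
      (PySem.List.dedup (e.2.2.map (fun t => t.1))).foldl (fun cnts v =>
        (cnts.1.insert v (cnts.1.getD v 0 + 1),
         cnts.2.insert (v, e.1) (cnts.2.getD (v, e.1) 0 + 1))) cnts)
      (PySem.Dict.empty, PySem.Dict.empty)
  items.map (fun e =>
    (e.1, e.2.1, e.2.2.map (fun t =>
      (t.1, t.2, cnts.1.getD t.1 0 - cnts.2.getD (t.1, e.1) 0))))

-- ===== PRECONDITION & SPEC =====
def Spec_count_tags_py (all_possible : List (String × String × List (String × String))) (out : List (String × String × List (String × String × Int))) : Prop := out = count_tags_py_alt all_possible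
instance (all_possible : List (String × String × List (String × String))) (out : List (String × String × List (String × String × Int))) : Decidable (Spec_count_tags_py all_possible out) := by unfold Spec_count_tags_py; infer_instance

-- ===== CLAIM (what is proved, stated in full; the proofs are below) =====
def Claim_equal_count_tags_py : Prop := ∀ (all_possible : List (String × String × List (String × String))), Dom_count_tags_py all_possible → Spec_count_tags_py all_possible (count_tags_py all_possible)

-- ===== LEMMAS AND PROOFS =====

-- a fold acting componentwise on a pair splits into two folds
theorem pv_pair_foldl {α β γ : Type} (l : List α) (f : β → α → β) (g : γ → α → γ)
    (a : β) (b : γ) :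
    l.foldl (fun s v => (f s.1 v, g s.2 v)) (a, b) = (l.foldl f a, l.foldl g b) := by
  induction l generalizing a b with
  | nil => rfl
  | cons x t ih => simpa using ih (f a x) (g b x)

-- accumulate-by-append fold is a map
theorem pv_foldl_append_map {α β : Type} (l : List α) (g : α → β) (init : List β) :
    l.foldl (fun acc x => acc ++ [g x]) init = init ++ l.map g := by
  induction l generalizing init with
  | nil => simp
  | cons x t ih => simp [ih]

-- counting fold of A's inner loop
theorem pv_foldl_count {α : Type} (l : List α) (p : α → Bool) (a : Int) :
    l.foldl (fun f e => if p e then f + 1 else f) a = a + (l.countP p : Int) := by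
  induction l generalizing a with
  | nil => simp
  | cons x t ih =>
    rw [List.foldl_cons, List.countP_cons]
    by_cases h : p x
    · rw [if_pos h, ih, if_pos h]; push_cast; ring
    · rw [if_neg h, ih, if_neg h]; push_cast; ring

theorem pv_countP_split {α : Type} (l : List α) (p q : α → Bool) :
    l.countP (fun x => !q x && p x) + l.countP (fun x => q x && p x) = l.countP p := by
  induction l with
  | nil => rfl
  | cons x t ih =>
    by_cases hq : q x <;> by_cases hp : p x <;>
      simp [hq, hp] <;> omega

theorem pv_count_dedup {α : Type} [BEq α] [LawfulBEq α] (l : List α) (v : α) :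
    (PySem.List.dedup l).count v = if v ∈ l then 1 else 0 := by
  by_cases h : v ∈ l
  · rw [if_pos h]
    exact List.count_eq_one_of_mem (PySem.List.nodup_dedup l) ((PySem.List.mem_dedup l v).2 h)
  · rw [if_neg h, List.count_eq_zero]
    exact fun hc => h ((PySem.List.mem_dedup l v).1 hc)

theorem pv_mem_vals_iff_any (tags : List (String × String)) (v : String) :
    (v ∈ tags.map (fun t => t.1)) ↔ (tags.any (fun t2 => t2.1 == v) = true) := by
  rw [List.any_eq_true]
  constructor
  · intro hm
    rcases List.mem_map.1 hm with ⟨t, ht, hv⟩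
    exact ⟨t, ht, by simp [hv]⟩
  · rintro ⟨t, ht, hv⟩
    exact List.mem_map.2 ⟨t, ht, by simpa using hv⟩

-- the totals counter counts the entries having the value
theorem pv_totals_getD (items : List (String × String × List (String × String)))
    (d : PySem.Dict String Int) (v : String) :
    (items.foldl (fun d e =>
        (PySem.List.dedup (e.2.2.map (fun t => t.1))).foldl
          (fun d v => d.insert v (d.getD v 0 + 1)) d) d).getD v 0
      = d.getD v 0 + (items.countP (fun e => e.2.2.any (fun t2 => t2.1 == v)) : Int) := by
  induction items generalizing d with
  | nil => simp
  | cons e t ih =>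
    rw [List.foldl_cons, ih, PySem.Dict.getD_foldl_insert_add_one, pv_count_dedup,
      List.countP_cons, if_congr (pv_mem_vals_iff_any e.2.2 v) rfl rfl]
    split_ifs with h
    · push_cast; ring
    · push_cast; ring

-- the pairs counter counts the entries with a given fc having the value
theorem pv_pairs_getD (items : List (String × String × List (String × String)))
    (d : PySem.Dict (String × String) Int) (v fc : String) :
    (items.foldl (fun d e =>
        (PySem.List.dedup (e.2.2.map (fun t => t.1))).foldl
          (fun d w => d.insert (w, e.1) (d.getD (w, e.1) 0 + 1)) d) d).getD (v, fc) 0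
      = d.getD (v, fc) 0 +
        (items.countP (fun e => e.1 == fc && e.2.2.any (fun t2 => t2.1 == v)) : Int) := by
  induction items generalizing d with
  | nil => simp
  | cons e t ih =>
    rw [List.foldl_cons, ih]
    have hmap : (PySem.List.dedup (e.2.2.map (fun t => t.1))).foldl
        (fun d w => d.insert (w, e.1) (d.getD (w, e.1) 0 + 1)) d
        = ((PySem.List.dedup (e.2.2.map (fun t => t.1))).map (fun w => (w, e.1))).foldl
            (fun d k => d.insert k (d.getD k 0 + 1)) d := by
      rw [List.foldl_map]
    rw [hmap, PySem.Dict.getD_foldl_insert_add_one, List.countP_cons]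
    have hc : ((PySem.List.dedup (e.2.2.map (fun t => t.1))).map (fun w => (w, e.1))).count (v, fc)
        = if e.1 = fc then (PySem.List.dedup (e.2.2.map (fun t => t.1))).count v else 0 := by
      by_cases hfc : e.1 = fc
      · rw [if_pos hfc]
        subst hfc
        exact List.count_map_of_injective _ (fun w => (w, e.1))
          (fun a b h => by simpa using congrArg Prod.fst h) v
      · rw [if_neg hfc, List.count_eq_zero]
        intro hm
        rcases List.mem_map.1 hm with ⟨w, _, hw⟩
        exact hfc (congrArg Prod.snd hw)
    rw [hc, pv_count_dedup]
    by_cases hfc : e.1 = fc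
    · rw [if_pos hfc, if_congr (pv_mem_vals_iff_any e.2.2 v) rfl rfl]
      have hbeq : (e.1 == fc) = true := by simp [hfc]
      rw [hbeq]
      simp only [Bool.true_and]
      split_ifs with h
      · push_cast; ring
      · push_cast; ring
    · have hbeq : (e.1 == fc) = false := by simp [hfc]
      rw [if_neg hfc, hbeq]
      simp only [Bool.false_and, if_neg (by simp : ¬ (false = true))]
      push_cast; ring

-- per (player, tag value): A's rescan count equals totals - pairs
theorem pv_found_eq (items : List (String × String × List (String × String)))
    (fc v : String) :
    (items.foldl (fun found e2 =>
        if fc != e2.1 then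
          if e2.2.2.any (fun t2 => t2.1 == v) then found + 1 else found
        else found) (0 : Int))
      = (items.countP (fun e => e.2.2.any (fun t2 => t2.1 == v)) : Int)
        - (items.countP (fun e => e.1 == fc && e.2.2.any (fun t2 => t2.1 == v)) : Int) := by
  have hfun : (fun (found : Int) (e2 : String × String × List (String × String)) =>
        if fc != e2.1 then
          if e2.2.2.any (fun t2 => t2.1 == v) then found + 1 else found
        else found)
      = (fun found e2 =>
        if (!(e2.1 == fc) && e2.2.2.any (fun t2 => t2.1 == v)) then found + 1 else found) := by
    funext found e2
    by_cases h : fc = e2.1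
    · simp [bne, h]
    · have h1 : (fc == e2.1) = false := by simp [h]
      have h2 : (e2.1 == fc) = false := by simp; exact fun he => h he.symm
      by_cases ha : e2.2.2.any (fun t2 => t2.1 == v) = true
      · simp [bne, h1, h2, ha]
      · simp [bne, h1, h2, ha]
  rw [hfun, pv_foldl_count]
  have h2 := pv_countP_split items (fun e => e.2.2.any (fun t2 => t2.1 == v))
      (fun e => e.1 == fc)
  simp only [Int.zero_add]
  omega

-- B's single loop over a pair of counters splits into two counter loops
theorem pv_cnts_split (items : List (String × String × List (String × String)))
    (a : PySem.Dict String Int) (b : PySem.Dict (String × String) Int) :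
    items.foldl (fun cnts e =>
        (PySem.List.dedup (e.2.2.map (fun t => t.1))).foldl (fun cnts v =>
          (cnts.1.insert v (cnts.1.getD v 0 + 1),
           cnts.2.insert (v, e.1) (cnts.2.getD (v, e.1) 0 + 1))) cnts) (a, b)
      = (items.foldl (fun d e =>
            (PySem.List.dedup (e.2.2.map (fun t => t.1))).foldl
              (fun d v => d.insert v (d.getD v 0 + 1)) d) a,
         items.foldl (fun d e =>
            (PySem.List.dedup (e.2.2.map (fun t => t.1))).foldl
              (fun d w => d.insert (w, e.1) (d.getD (w, e.1) 0 + 1)) d) b) := by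
  induction items generalizing a b with
  | nil => rfl
  | cons e t ih =>
    rw [List.foldl_cons,
      pv_pair_foldl (PySem.List.dedup (e.2.2.map (fun t => t.1)))
        (fun d v => d.insert v (d.getD v 0 + 1))
        (fun d v => d.insert (v, e.1) (d.getD (v, e.1) 0 + 1)) a b]
    exact ih _ _

-- ===== VERDICT (by name: the statement is the Claim_ definition above) =====
theorem count_tags_py_spec : Claim_equal_count_tags_py := by
  intro xs _
  unfold Spec_count_tags_py
  simp only [count_tags_py, count_tags_py_alt]
  generalize pvItems xs = items
  rw [pv_cnts_split, pv_foldl_append_map]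
  simp only [List.nil_append]
  apply List.map_congr_left
  intro e1 _
  refine congrArg (fun z => (e1.1, e1.2.1, z)) ?_
  rw [pv_foldl_append_map]
  simp only [List.nil_append]
  apply List.map_congr_left
  intro t1 _
  refine congrArg (fun z => (t1.1, t1.2, z)) ?_
  rw [pv_found_eq, pv_totals_getD, pv_pairs_getD]
  simp
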